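-- pv_equiv track=rewrite | github.com/AitorsanchezGH/EstudioDAA | DivideYVenceras/cifrasComunDyV.py | DyV
-- ===== SOURCE A (Python) =====
-- def extraerCifras (numero):
--     solucion = [False]*10
--
--     while (numero>0):
--         cifra = numero % 10
--         numero = numero // 10
--         solucion[cifra] = True
--     return solucion
--
-- def combinar(sol1, sol2):
--     solucion = [False]*10
--     for i in range (len (sol1)):
--         if (sol1[i]==True) and (sol2[i]==True):
--             solucion[i] = True
--     return solucion
--
-- def DyV (vector,ini,fin):
--     if (ini==fin):
--         cifras = extraerCifras (numeros[ini])
--         return cifras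
--     else:
--         medio = (ini+fin)//2
--         solucion1 = DyV(vector,ini,medio)
--         solucion2 = DyV(vector,medio+1,fin)
--         solucion = combinar(solucion1,solucion2)
--         return solucion
--
-- numeros = [2341, 1523, 4812, 5132]
-- ===== SOURCE B (Python) =====
-- def extraerCifras(numero):
--     solucion = [False]*10
--     while numero > 0:
--         cifra = numero % 10
--         numero = numero // 10
--         solucion[cifra] = True
--     return solucion
--
-- def DyV(vector, ini, fin):
--     comunes = extraerCifras(numeros[ini])
--     for i in range(ini + 1, fin + 1):
--         cifras = extraerCifras(numeros[i])
--         comunes = [a and b for a, b in zip(comunes, cifras)]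
--     return comunes
--
-- numeros = [2341, 1523, 4812, 5132]
-- ===== Notes on version B (the rewrite author's own statement) =====
-- stated objective: simpler
-- what changed: Replaces the divide-and-conquer binary recursion plus the index-loop combinar helper with a single left-to-right fold: seed with the digit vector of numeros[ini] and AND it element-wise (zip) against each following index's digit vector.
import Mathlib
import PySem

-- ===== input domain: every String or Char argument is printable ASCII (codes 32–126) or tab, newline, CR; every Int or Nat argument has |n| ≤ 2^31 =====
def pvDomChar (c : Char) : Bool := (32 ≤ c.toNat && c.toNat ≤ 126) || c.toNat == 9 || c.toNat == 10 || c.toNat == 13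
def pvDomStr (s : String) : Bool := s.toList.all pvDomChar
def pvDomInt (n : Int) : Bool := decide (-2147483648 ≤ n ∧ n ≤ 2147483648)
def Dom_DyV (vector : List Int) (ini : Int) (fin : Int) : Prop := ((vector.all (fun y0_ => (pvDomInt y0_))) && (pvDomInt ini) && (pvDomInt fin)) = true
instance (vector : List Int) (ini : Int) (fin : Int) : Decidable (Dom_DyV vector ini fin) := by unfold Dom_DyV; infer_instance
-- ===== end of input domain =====

-- B replaces A's divide-and-conquer recursion (+ combinar index loop) by a single left fold
-- AND-ing digit vectors; objective: simpler. Both read the module-level global `numeros`.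

-- ===== PORT A =====
-- module-level global `numeros` used by DyV (the `vector` parameter is ignored by the source)
def numerosG : List Int := [2341, 1523, 4812, 5132]

-- while numero > 0: cifra = numero % 10; numero = numero // 10; solucion[cifra] = True
def extraerCifrasGo (numero : Int) (sol : List Bool) : List Bool :=
  if _h : numero > 0 then
    extraerCifrasGo (PySem.Int.floordiv numero 10)
      (sol.set (PySem.Int.mod numero 10).toNat true)
  else sol
termination_by numero.toNat
decreasing_by
  rw [PySem.Int.floordiv_eq_ediv_of_pos (by omega : (0:Int) < 10)]
  omega

def extraerCifras (numero : Int) : List Bool :=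
  extraerCifrasGo numero (List.replicate 10 false)

-- for i in range(len(sol1)): if sol1[i]==True and sol2[i]==True: solucion[i] = True
-- (i is always a valid index of sol1; getD is exact there; out-of-range on sol2 cannot occur in use)
def combinar (sol1 sol2 : List Bool) : List Bool :=
  (List.range sol1.length).foldl
    (fun sol i => if sol1.getD i false == true && sol2.getD i false == true then sol.set i true else sol)
    (List.replicate 10 false)

def DyV (vector : List Int) (ini : Int) (fin : Int) : List Bool :=
  if ini = fin then
    extraerCifras ((PySem.List.pyGet? numerosG ini).getD 0)  -- none = IndexError, excluded by Pre_
  else if _h : ini < fin then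
    combinar (DyV vector ini (PySem.Int.floordiv (ini + fin) 2))
             (DyV vector (PySem.Int.floordiv (ini + fin) 2 + 1) fin)
  else []  -- ini > fin: the Python recursion never terminates here (outside Pre_)
termination_by (fin - ini).toNat
decreasing_by
  all_goals rw [PySem.Int.floordiv_eq_ediv_of_pos (by omega : (0:Int) < 2)]
  all_goals omega

-- ===== PORT B =====
-- Source B defines its own (textually identical) extraerCifras and global numeros; ported separately
def numerosB : List Int := [2341, 1523, 4812, 5132]

def extraerCifrasGoB (numero : Int) (sol : List Bool) : List Bool :=
  if _h : numero > 0 then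
    extraerCifrasGoB (PySem.Int.floordiv numero 10)
      (sol.set (PySem.Int.mod numero 10).toNat true)
  else sol
termination_by numero.toNat
decreasing_by
  rw [PySem.Int.floordiv_eq_ediv_of_pos (by omega : (0:Int) < 10)]
  omega

def extraerCifrasB (numero : Int) : List Bool :=
  extraerCifrasGoB numero (List.replicate 10 false)

def DyV_alt (vector : List Int) (ini : Int) (fin : Int) : List Bool :=
  (PySem.List.pyRange (ini + 1) (fin + 1) 1).foldl
    (fun comunes i =>
      List.zipWith (fun a b => a && b) comunes
        (extraerCifrasB ((PySem.List.pyGet? numerosB i).getD 0)))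
    (extraerCifrasB ((PySem.List.pyGet? numerosB ini).getD 0))

-- ===== PRECONDITION & SPEC =====
-- Pre_ excludes exactly the inputs where the Python A does not return: ini > fin (the recursion
-- never terminates) and base-case indices outside the Python index range [-4, 3] of the
-- 4-element global `numeros` (IndexError).
def Pre_DyV (vector : List Int) (ini : Int) (fin : Int) : Prop := ini ≤ fin ∧ -4 ≤ ini ∧ fin ≤ 3
instance (vector : List Int) (ini : Int) (fin : Int) : Decidable (Pre_DyV vector ini fin) := by
  unfold Pre_DyV; infer_instance

def pvWitness_DyV : List Int × Int × Int := ([2341, 1523, 4812, 5132], 0, 3)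

def Spec_DyV (vector : List Int) (ini : Int) (fin : Int) (out : List Bool) : Prop := out = DyV_alt vector ini fin
instance (vector : List Int) (ini : Int) (fin : Int) (out : List Bool) : Decidable (Spec_DyV vector ini fin out) := by unfold Spec_DyV; infer_instance

-- ===== CLAIM (what is proved, stated in full; the proofs are below) =====
def Claim_equal_DyV : Prop := ∀ (vector : List Int) (ini : Int) (fin : Int), Dom_DyV vector ini fin → Pre_DyV vector ini fin → Spec_DyV vector ini fin (DyV vector ini fin)

-- ===== LEMMAS AND PROOFS =====

theorem length_extraerCifrasGo (numero : Int) (sol : List Bool) :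
    (extraerCifrasGo numero sol).length = sol.length := by
  fun_induction extraerCifrasGo with
  | case1 n s h ih => simpa using ih
  | case2 n s h => rfl

theorem length_extraerCifras (numero : Int) : (extraerCifras numero).length = 10 := by
  simp [extraerCifras, length_extraerCifrasGo]

theorem zipWith_and_assoc (x y z : List Bool) :
    List.zipWith (fun a b => a && b) (List.zipWith (fun a b => a && b) x y) z
      = List.zipWith (fun a b => a && b) x (List.zipWith (fun a b => a && b) y z) := by
  induction x generalizing y z with
  | nil => simp
  | cons a x ih =>
    cases y with
    | nil => simp
    | cons b y =>
      cases z with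
      | nil => simp
      | cons c z => simp [ih, Bool.and_assoc]

theorem combinar_loop (s1 s2 : List Bool) (h1 : s1.length = 10) (h2 : s2.length = 10) :
    ∀ k, k ≤ 10 →
      (List.range k).foldl
        (fun sol i => if s1.getD i false == true && s2.getD i false == true then sol.set i true else sol)
        (List.replicate 10 false)
      = (List.zipWith (fun a b => a && b) s1 s2).take k ++ List.replicate (10 - k) false := by
  intro k
  induction k with
  | zero => simp
  | succ k ih =>
    intro hk
    have hk' : k < 10 := hk
    have hZ : (List.zipWith (fun a b => a && b) s1 s2).length = 10 := by
      simp [List.length_zipWith, h1, h2]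
    rw [List.range_succ, List.foldl_append, ih (by omega)]
    have hs1 : s1.getD k false = s1[k]'(by omega) := List.getD_eq_getElem s1 false (by omega)
    have hs2 : s2.getD k false = s2[k]'(by omega) := List.getD_eq_getElem s2 false (by omega)
    have hrep : List.replicate (10 - k) false = false :: List.replicate (10 - (k + 1)) false := by
      have : 10 - k = (10 - (k + 1)) + 1 := by omega
      rw [this, List.replicate_succ]
    have hlen : ((List.zipWith (fun a b => a && b) s1 s2).take k).length = k := by
      simp [hZ]; omega
    have htake : (List.zipWith (fun a b => a && b) s1 s2).take (k + 1)
        = (List.zipWith (fun a b => a && b) s1 s2).take k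
          ++ [(List.zipWith (fun a b => a && b) s1 s2)[k]'(by omega)] := by
      rw [List.take_add_one]
      simp [List.getElem?_eq_getElem (by omega : k < (List.zipWith (fun a b => a && b) s1 s2).length)]
    have hZk : (List.zipWith (fun a b => a && b) s1 s2)[k]'(by omega)
        = (s1[k]'(by omega) && s2[k]'(by omega)) := by
      simp [List.getElem_zipWith]
    have hset : ∀ c : Bool,
        ((List.zipWith (fun a b => a && b) s1 s2).take k
          ++ false :: List.replicate (10 - (k + 1)) false).set k c
        = (List.zipWith (fun a b => a && b) s1 s2).take k
          ++ c :: List.replicate (10 - (k + 1)) false := by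
      intro c
      rw [List.set_append_right _ _ (by omega : ((List.zipWith (fun a b => a && b) s1 s2).take k).length ≤ k)]
      simp [hlen]
    rw [hrep, htake, hZk]
    simp only [List.foldl_cons, List.foldl_nil, hs1, hs2]
    cases h1k : s1[k]'(by omega) <;> cases h2k : s2[k]'(by omega)
    · rw [if_neg (by decide)]; simp [List.append_assoc]
    · rw [if_neg (by decide)]; simp [List.append_assoc]
    · rw [if_neg (by decide)]; simp [List.append_assoc]
    · rw [if_pos (by decide), hset]; simp [List.append_assoc]

theorem combinar_eq_zipWith (s1 s2 : List Bool) (h1 : s1.length = 10) (h2 : s2.length = 10) :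
    combinar s1 s2 = List.zipWith (fun a b => a && b) s1 s2 := by
  have hZ : (List.zipWith (fun a b => a && b) s1 s2).length = 10 := by
    simp [List.length_zipWith, h1, h2]
  rw [combinar, h1, combinar_loop s1 s2 h1 h2 10 (by omega)]
  simp [List.take_of_length_le (by omega : (List.zipWith (fun a b => a && b) s1 s2).length ≤ 10)]

theorem extraerCifrasGoB_eq (numero : Int) (sol : List Bool) :
    extraerCifrasGoB numero sol = extraerCifrasGo numero sol := by
  fun_induction extraerCifrasGoB with
  | case1 n s h ih =>
    conv_rhs => rw [extraerCifrasGo]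
    rw [dif_pos h]; exact ih
  | case2 n s h => rw [extraerCifrasGo, dif_neg h]

-- the digit vector at a (Python) index of the global `numeros`, as B's port computes it
def cifrasAt (i : Int) : List Bool := extraerCifrasB ((PySem.List.pyGet? numerosB i).getD 0)

theorem cifrasAt_eq (i : Int) :
    cifrasAt i = extraerCifras ((PySem.List.pyGet? numerosG i).getD 0) := by
  rw [cifrasAt, extraerCifrasB, extraerCifras, extraerCifrasGoB_eq]; rfl

theorem length_foldl_and (L : List Int) : ∀ c : List Bool, c.length = 10 →
    (L.foldl (fun comunes i => List.zipWith (fun a b => a && b) comunes (cifrasAt i)) c).length = 10 := by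
  induction L with
  | nil => intro c hc; simpa using hc
  | cons i L ih =>
    intro c hc
    simp only [List.foldl_cons]
    exact ih _ (by simp [List.length_zipWith, hc, cifrasAt_eq, length_extraerCifras])

theorem foldl_zip_and (L : List Int) : ∀ x s : List Bool,
    L.foldl (fun comunes i => List.zipWith (fun a b => a && b) comunes (cifrasAt i))
        (List.zipWith (fun a b => a && b) x s)
      = List.zipWith (fun a b => a && b) x
        (L.foldl (fun comunes i => List.zipWith (fun a b => a && b) comunes (cifrasAt i)) s) := by
  induction L with
  | nil => intro x s; rfl
  | cons i L ih =>
    intro x s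
    simp only [List.foldl_cons]
    rw [zipWith_and_assoc, ih]

theorem DyV_alt_eq_fold (v : List Int) (ini fin : Int) :
    DyV_alt v ini fin
      = (PySem.List.pyRange (ini + 1) (fin + 1) 1).foldl
          (fun comunes i => List.zipWith (fun a b => a && b) comunes (cifrasAt i)) (cifrasAt ini) := rfl

theorem length_DyV_alt (v : List Int) (ini fin : Int) : (DyV_alt v ini fin).length = 10 := by
  rw [DyV_alt_eq_fold]
  exact length_foldl_and _ _ (by simp [cifrasAt_eq, length_extraerCifras])

theorem DyV_eq_alt (n : Nat) : ∀ (v : List Int) (ini fin : Int),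
    (fin - ini).toNat = n → ini ≤ fin → DyV v ini fin = DyV_alt v ini fin := by
  induction n using Nat.strong_induction_on with
  | _ n ih =>
    intro v ini fin hn hle
    by_cases heq : ini = fin
    · subst heq
      rw [DyV, if_pos rfl, DyV_alt_eq_fold,
        PySem.List.pyRange_one_eq_nil (by omega : ini + 1 ≤ ini + 1),
        List.foldl_nil, cifrasAt_eq]
    · have hlt : ini < fin := lt_of_le_of_ne hle heq
      have hmed : PySem.Int.floordiv (ini + fin) 2 = (ini + fin) / 2 :=
        PySem.Int.floordiv_eq_ediv_of_pos (by omega)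
      have hml : ini ≤ PySem.Int.floordiv (ini + fin) 2 := by rw [hmed]; omega
      have hmr : PySem.Int.floordiv (ini + fin) 2 < fin := by rw [hmed]; omega
      rw [DyV, if_neg heq, dif_pos hlt]
      rw [ih ((PySem.Int.floordiv (ini + fin) 2) - ini).toNat (by omega) v ini _ rfl hml,
          ih (fin - ((PySem.Int.floordiv (ini + fin) 2) + 1)).toNat (by omega) v _ fin rfl (by omega),
          combinar_eq_zipWith _ _ (length_DyV_alt ..) (length_DyV_alt ..)]
      rw [DyV_alt_eq_fold v ini fin,
        PySem.List.pyRange_one_append (ini + 1) (PySem.Int.floordiv (ini + fin) 2 + 1) (fin + 1)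
          (by omega) (by omega),
        List.foldl_append, ← DyV_alt_eq_fold v ini (PySem.Int.floordiv (ini + fin) 2),
        PySem.List.pyRange_one_cons (by omega :
          PySem.Int.floordiv (ini + fin) 2 + 1 < fin + 1),
        List.foldl_cons]
      rw [foldl_zip_and, ← DyV_alt_eq_fold]

-- ===== VERDICT (by name: the statement is the Claim_ definition above) =====
theorem DyV_spec : Claim_equal_DyV := by
  intro v ini fin _hdom hpre
  unfold Spec_DyV
  exact DyV_eq_alt (fin - ini).toNat v ini fin rfl hpre.1
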